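-- pv_equiv track=rewrite | github.com/NaZe0320/chessudoku_puzzle | validators.py | get_king_moves
-- ===== SOURCE A (Python) =====
-- def get_king_moves(row, col):
--     """킹이 갈 수 있는 위치들 반환"""
--     moves = []
--     king_moves = [(-1,-1), (-1,0), (-1,1), (0,-1), (0,1), (1,-1), (1,0), (1,1)]
--
--     for dr, dc in king_moves:
--         new_row, new_col = row + dr, col + dc
--         if 0 <= new_row < 9 and 0 <= new_col < 9:
--             moves.append((new_row, new_col))
--     return moves
-- ===== SOURCE B (Python) =====
-- def get_king_moves(row, col):
--     """킹이 갈 수 있는 위치들 반환"""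
--     moves = []
--     for nr in range(max(0, row - 1), min(8, row + 1) + 1):
--         for nc in range(max(0, col - 1), min(8, col + 1) + 1):
--             if nr == row and nc == col:
--                 continue
--             moves.append((nr, nc))
--     return moves
-- ===== Notes on version B (the rewrite author's own statement) =====
-- stated objective: alternative
-- what changed: B computes the clamped row and column ranges once and enumerates their product in nested loops skipping the center cell, instead of A's fixed list of 8 offsets each re-checked against the board bounds.
import Mathlib
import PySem

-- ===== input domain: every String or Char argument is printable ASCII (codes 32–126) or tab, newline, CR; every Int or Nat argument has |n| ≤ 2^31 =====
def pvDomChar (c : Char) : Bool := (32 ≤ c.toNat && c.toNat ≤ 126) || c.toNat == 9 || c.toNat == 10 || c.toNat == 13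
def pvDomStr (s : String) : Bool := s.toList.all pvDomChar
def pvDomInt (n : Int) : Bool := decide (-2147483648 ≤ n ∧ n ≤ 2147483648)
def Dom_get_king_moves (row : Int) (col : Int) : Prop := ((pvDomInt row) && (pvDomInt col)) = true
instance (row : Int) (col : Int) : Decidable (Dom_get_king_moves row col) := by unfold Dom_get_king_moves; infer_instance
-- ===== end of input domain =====

-- B replaces A's per-offset bounds check with clamped row/col ranges traversed in nested loops (alternative decomposition, same output order).


-- ===== PORT A =====
def get_king_moves (row : Int) (col : Int) : List (Int × Int) :=
  let king_moves : List (Int × Int) :=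
    [(-1,-1), (-1,0), (-1,1), (0,-1), (0,1), (1,-1), (1,0), (1,1)]
  king_moves.foldl (fun moves d =>
    let new_row := row + d.1
    let new_col := col + d.2
    if 0 ≤ new_row ∧ new_row < 9 ∧ 0 ≤ new_col ∧ new_col < 9 then
      moves ++ [(new_row, new_col)]
    else moves) []

-- ===== PORT B =====
def get_king_moves_alt (row : Int) (col : Int) : List (Int × Int) :=
  (PySem.List.pyRange (max 0 (row - 1)) (min 8 (row + 1) + 1) 1).foldl (fun moves nr =>
    (PySem.List.pyRange (max 0 (col - 1)) (min 8 (col + 1) + 1) 1).foldl (fun ms nc =>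
      if nr = row ∧ nc = col then ms else ms ++ [(nr, nc)]) moves) []

-- ===== PRECONDITION & SPEC =====
def Spec_get_king_moves (row : Int) (col : Int) (out : List (Int × Int)) : Prop := out = get_king_moves_alt row col
instance (row : Int) (col : Int) (out : List (Int × Int)) : Decidable (Spec_get_king_moves row col out) := by unfold Spec_get_king_moves; infer_instance

-- ===== CLAIM (what is proved, stated in full; the proofs are below) =====
def Claim_equal_get_king_moves : Prop := ∀ (row : Int) (col : Int), Dom_get_king_moves row col → Spec_get_king_moves row col (get_king_moves row col)

-- ===== LEMMAS AND PROOFS =====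

theorem foldl_keep (l : List Int) (init : List (Int × Int)) :
    List.foldl (fun m _ => m) init l = init := by
  induction l generalizing init <;> simp [List.foldl, *]

theorem A_step_nil (row col : Int) (l : List (Int × Int)) (init : List (Int × Int))
    (h : ∀ d ∈ l, ¬(0 ≤ row + d.1 ∧ row + d.1 < 9 ∧ 0 ≤ col + d.2 ∧ col + d.2 < 9)) :
    l.foldl (fun moves d =>
      if 0 ≤ row + d.1 ∧ row + d.1 < 9 ∧ 0 ≤ col + d.2 ∧ col + d.2 < 9 then
        moves ++ [(row + d.1, col + d.2)]
      else moves) init = init := by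
  induction l generalizing init with
  | nil => rfl
  | cons d t ih =>
    rw [List.foldl_cons, if_neg (h d (List.mem_cons_self))]
    exact ih init (fun e he => h e (List.mem_cons_of_mem d he))

theorem offboard (row col : Int) (h : (row ≤ -2 ∨ 10 ≤ row) ∨ (col ≤ -2 ∨ 10 ≤ col)) :
    ∀ d ∈ [((-1 : Int), (-1 : Int)), (-1,0), (-1,1), (0,-1), (0,1), (1,-1), (1,0), (1,1)],
      ¬(0 ≤ row + d.1 ∧ row + d.1 < 9 ∧ 0 ≤ col + d.2 ∧ col + d.2 < 9) := by
  intro d hd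
  fin_cases hd <;> simp <;> omega

theorem offRow (row col : Int) (h : row ≤ -2 ∨ 10 ≤ row) :
    get_king_moves row col = get_king_moves_alt row col := by
  unfold get_king_moves get_king_moves_alt
  rw [show PySem.List.pyRange (max 0 (row - 1)) (min 8 (row + 1) + 1) 1 = []
        from PySem.List.pyRange_one_eq_nil (by omega)]
  exact (A_step_nil row col _ [] (offboard row col (Or.inl h))).trans rfl

theorem offCol (row col : Int) (h : col ≤ -2 ∨ 10 ≤ col) :
    get_king_moves row col = get_king_moves_alt row col := by
  unfold get_king_moves get_king_moves_alt
  rw [show PySem.List.pyRange (max 0 (col - 1)) (min 8 (col + 1) + 1) 1 = []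
        from PySem.List.pyRange_one_eq_nil (by omega)]
  exact (A_step_nil row col _ [] (offboard row col (Or.inr h))).trans
    (foldl_keep (PySem.List.pyRange (max 0 (row - 1)) (min 8 (row + 1) + 1) 1) []).symm

theorem get_king_moves_eq (row col : Int) :
    get_king_moves row col = get_king_moves_alt row col := by
  by_cases hr : row ≤ -2 ∨ 10 ≤ row
  · exact offRow row col hr
  · by_cases hc : col ≤ -2 ∨ 10 ≤ col
    · exact offCol row col hc
    · have hr1 : -1 ≤ row := by omega
      have hr2 : row ≤ 9 := by omega
      have hc1 : -1 ≤ col := by omega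
      have hc2 : col ≤ 9 := by omega
      interval_cases row <;> interval_cases col <;> decide

-- ===== VERDICT (by name: the statement is the Claim_ definition above) =====
theorem get_king_moves_spec : Claim_equal_get_king_moves := by
  intro row col _
  unfold Spec_get_king_moves
  exact get_king_moves_eq row col
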